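-- pv_equiv track=rewrite | github.com/Team-2411-RL-Unicycle/rl-unicycle | venv_rluni/lib/python3.12/site-packages/moteus/moteus_tool.py | _base64_serial_number
-- ===== SOURCE A (Python) =====
-- def _base64_serial_number(s1, s2, s3):
--     serial_num = (s1 << 64) | (s2 << 32) | s3;
--     digits = "ABCDEFGHIJKLMNOPQRSTUVWXYZabcdefghijklmnopqrstuvwxyz0123456789+/";
--     assert len(digits) == 64
--
--     result = [0] * 16
--
--     for i in range(16):
--         digit_num = serial_num % 64
--         result[15 - i] = digits[digit_num]
--         serial_num //= 64
--
--     return ''.join(result)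
-- ===== SOURCE B (Python) =====
-- def _base64_serial_number(s1, s2, s3):
--     alph = "ABCDEFGHIJKLMNOPQRSTUVWXYZabcdefghijklmnopqrstuvwxyz0123456789+/"
--     n = ((s1 << 64) | (s2 << 32) | s3) % (1 << 96)
--     data = n.to_bytes(12, 'big')
--     out = []
--     for i in range(0, 12, 3):
--         b0, b1, b2 = data[i], data[i + 1], data[i + 2]
--         out.append(alph[b0 // 4])
--         out.append(alph[b0 % 4 * 16 + b1 // 16])
--         out.append(alph[b1 % 16 * 4 + b2 // 64])
--         out.append(alph[b2 % 64])
--     return ''.join(out)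
-- ===== Notes on version B (the rewrite author's own statement) =====
-- stated objective: alternative
-- what changed: Instead of A's 16 least-significant-first modulo/floor-division steps filling the result back to front, B masks to the low 96 bits, serialises them as 12 big-endian bytes, and emits the 16 digits front to back by base64-encoding the bytes three at a time (RFC 4648 bit grouping).
import Mathlib
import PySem

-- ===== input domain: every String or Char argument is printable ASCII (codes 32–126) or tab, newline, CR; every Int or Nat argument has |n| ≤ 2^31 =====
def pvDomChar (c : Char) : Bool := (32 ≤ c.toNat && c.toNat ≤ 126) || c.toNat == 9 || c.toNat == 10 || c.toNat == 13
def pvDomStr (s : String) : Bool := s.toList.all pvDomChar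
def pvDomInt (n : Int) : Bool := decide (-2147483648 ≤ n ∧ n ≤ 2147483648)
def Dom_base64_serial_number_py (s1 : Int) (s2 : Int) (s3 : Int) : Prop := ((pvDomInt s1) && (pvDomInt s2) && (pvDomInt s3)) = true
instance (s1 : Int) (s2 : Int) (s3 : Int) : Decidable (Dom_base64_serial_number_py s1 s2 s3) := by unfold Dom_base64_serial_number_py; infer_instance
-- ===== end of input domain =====

-- B replaces A's manual 16-step base-64 digit loop by masking to the low 96 bits and
-- base64-encoding the 12 big-endian bytes front to back, three bytes per four digits.

-- ===== PORT A =====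
def pvDigitsA : String := "ABCDEFGHIJKLMNOPQRSTUVWXYZabcdefghijklmnopqrstuvwxyz0123456789+/"

def base64_serial_number_py (s1 : Int) (s2 : Int) (s3 : Int) : String :=
  let serial := PySem.Int.bor (PySem.Int.bor (s1 <<< 64) (s2 <<< 32)) s3
  -- result = [0]*16: every cell is overwritten before the join reads it, so the placeholder '0' is never seen
  let st := (PySem.List.pyRange 0 16 1).foldl
    (fun (st : List Char × Int) i =>
      let digit_num := PySem.Int.mod st.2 64
      -- digits[digit_num] is exact here: 0 ≤ digit_num < 64 = len(digits), so the index never raises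
      let c := (PySem.Str.pyGet? pvDigitsA digit_num).getD ' '
      -- result[15 - i] = c: 15 - i is always in 0..15 for i in range(16), so plain List.set is exact
      (st.1.set (15 - i).toNat c, PySem.Int.floordiv st.2 64))
    (List.replicate 16 '0', serial)
  String.ofList st.1

-- ===== PORT B =====
-- the base64 alphabet used by base64.b64encode
def pvAlphB : List Char := "ABCDEFGHIJKLMNOPQRSTUVWXYZabcdefghijklmnopqrstuvwxyz0123456789+/".toList

-- n.to_bytes(12, 'big')
def pvToBytesBE (n : Nat) : List Nat := (List.range 12).map (fun i => n / 256 ^ (11 - i) % 256)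

-- base64.b64encode on a byte string whose length is a multiple of 3 (so no '=' padding arises):
-- each 3-byte group becomes 4 six-bit digits, MSB first — exactly RFC 4648 / CPython's encoder
def pvB64Encode : List Nat → List Char
  | b0 :: b1 :: b2 :: rest =>
      pvAlphB.getD (b0 / 4) ' ' :: pvAlphB.getD (b0 % 4 * 16 + b1 / 16) ' ' ::
      pvAlphB.getD (b1 % 16 * 4 + b2 / 64) ' ' :: pvAlphB.getD (b2 % 64) ' ' :: pvB64Encode rest
  | _ => []

def base64_serial_number_py_alt (s1 : Int) (s2 : Int) (s3 : Int) : String :=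
  let serial := PySem.Int.bor (PySem.Int.bor (s1 <<< 64) (s2 <<< 32)) s3
  let n := (PySem.Int.mod serial (2 ^ 96)).toNat
  String.ofList (pvB64Encode (pvToBytesBE n))

-- ===== PRECONDITION & SPEC =====
def Spec_base64_serial_number_py (s1 : Int) (s2 : Int) (s3 : Int) (out : String) : Prop := out = base64_serial_number_py_alt s1 s2 s3
instance (s1 : Int) (s2 : Int) (s3 : Int) (out : String) : Decidable (Spec_base64_serial_number_py s1 s2 s3 out) := by unfold Spec_base64_serial_number_py; infer_instance

-- ===== CLAIM (what is proved, stated in full; the proofs are below) =====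
def Claim_equal_base64_serial_number_py : Prop := ∀ (s1 : Int) (s2 : Int) (s3 : Int), Dom_base64_serial_number_py s1 s2 s3 → Spec_base64_serial_number_py s1 s2 s3 (base64_serial_number_py s1 s2 s3)

-- ===== LEMMAS AND PROOFS =====

-- A's digit k (counting from the least significant) is the k-th base-64 digit of the
-- low 96 bits of the serial number.
theorem pv_key (x : Int) (j : Nat) (hj : j < 16) :
    PySem.Int.mod (PySem.Int.floordiv x (64 ^ j)) 64 =
      (((PySem.Int.mod x (2 ^ 96)).toNat / 64 ^ j % 64 : Nat) : Int) := by
  have hp : (0:Int) < 64 ^ j := by positivity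
  rw [PySem.Int.floordiv_eq_ediv_of_pos hp, PySem.Int.mod_eq_emod_of_pos (by norm_num : (0:Int) < 64),
      PySem.Int.mod_eq_emod_of_pos (by norm_num : (0:Int) < 2 ^ 96)]
  have hn0 : 0 ≤ x % 2 ^ 96 := Int.emod_nonneg x (by norm_num)
  have h64 : (64:Int) ^ j * 64 ^ (16 - j) = 2 ^ 96 := by
    rw [← pow_add, show j + (16 - j) = 16 by omega]; norm_num
  have hx : x = ((x % 2 ^ 96).toNat : Int) + 64 ^ j * (64 ^ (16 - j) * (x / 2 ^ 96)) := by
    rw [Int.toNat_of_nonneg hn0, ← mul_assoc, h64]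
    have := Int.mul_ediv_add_emod x (2 ^ 96)
    omega
  generalize (x % 2 ^ 96).toNat = n at *
  rw [hx, Int.add_mul_ediv_left _ _ (ne_of_gt hp),
      show (64:Int) ^ (16 - j) * (x / 2 ^ 96) = 64 * (64 ^ (15 - j) * (x / 2 ^ 96)) by
        rw [show 16 - j = 1 + (15 - j) by omega, pow_add]; ring,
      Int.add_mul_emod_self_left]
  norm_cast

-- iterated `serial_num //= 64` is floor division by a power of 64
theorem pv_fdiv_step (y : Int) (a : Nat) :
    PySem.Int.floordiv (PySem.Int.floordiv y (64 ^ a)) 64 = PySem.Int.floordiv y (64 ^ (a + 1)) := by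
  have hp : (0:Int) < 64 ^ a := by positivity
  rw [PySem.Int.floordiv_eq_ediv_of_pos hp, PySem.Int.floordiv_eq_ediv_of_pos (by norm_num : (0:Int) < 64),
      PySem.Int.floordiv_eq_ediv_of_pos (by positivity), pow_succ]
  exact Int.ediv_ediv_of_nonneg (le_of_lt hp)

set_option maxRecDepth 8000 in
set_option maxHeartbeats 2000000 in
theorem pv_main (x : Int) :
    String.ofList ((PySem.List.pyRange 0 16 1).foldl
      (fun (st : List Char × Int) i =>
        (st.1.set (15 - i).toNat ((PySem.Str.pyGet? pvDigitsA (PySem.Int.mod st.2 64)).getD ' '),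
         PySem.Int.floordiv st.2 64))
      (List.replicate 16 '0', x)).1
    = String.ofList (pvB64Encode (pvToBytesBE ((PySem.Int.mod x (2 ^ 96)).toNat))) := by
  rw [show PySem.List.pyRange 0 16 1 = [0,1,2,3,4,5,6,7,8,9,10,11,12,13,14,15] from by decide]
  simp only [List.foldl_cons, List.foldl_nil]
  have h1 : PySem.Int.floordiv x 1 = x := by
    rw [PySem.Int.floordiv_eq_ediv_of_pos (by norm_num : (0:Int) < 1)]; exact Int.ediv_one x
  have c0 : PySem.Int.mod x 64 = (((PySem.Int.mod x (2 ^ 96)).toNat % 64 : Nat) : Int) := by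
    have := pv_key x 0 (by norm_num)
    rwa [pow_zero, h1, pow_zero, Nat.div_one] at this
  have e1 : PySem.Int.floordiv x 64 = PySem.Int.floordiv x (64 ^ 1) := by norm_num
  rw [e1]
  simp only [pv_fdiv_step, Nat.reduceAdd]
  rw [c0, pv_key x 1 (by norm_num), pv_key x 2 (by norm_num), pv_key x 3 (by norm_num),
      pv_key x 4 (by norm_num), pv_key x 5 (by norm_num), pv_key x 6 (by norm_num),
      pv_key x 7 (by norm_num), pv_key x 8 (by norm_num), pv_key x 9 (by norm_num),
      pv_key x 10 (by norm_num), pv_key x 11 (by norm_num), pv_key x 12 (by norm_num),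
      pv_key x 13 (by norm_num), pv_key x 14 (by norm_num), pv_key x 15 (by norm_num)]
  simp only [PySem.Str.pyGet?_natCast, show pvDigitsA.toList = pvAlphB from rfl,
    ← List.getD_eq_getElem?_getD]
  generalize (PySem.Int.mod x (2 ^ 96)).toNat = n
  simp only [pvToBytesBE, show List.range 12 = [0,1,2,3,4,5,6,7,8,9,10,11] from rfl,
    List.map_cons, List.map_nil, pvB64Encode]
  norm_num
  rw [show n / 309485009821345068724781056 % 256 / 4 = n / 1237940039285380274899124224 % 64 from by omega,
      show n / 309485009821345068724781056 % 4 * 16 + n / 1208925819614629174706176 % 256 / 16 = n / 19342813113834066795298816 % 64 from by omega,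
      show n / 1208925819614629174706176 % 16 * 4 + n / 4722366482869645213696 % 256 / 64 = n / 302231454903657293676544 % 64 from by omega,
      show n / 18446744073709551616 % 256 / 4 = n / 73786976294838206464 % 64 from by omega,
      show n / 18446744073709551616 % 4 * 16 + n / 72057594037927936 % 256 / 16 = n / 1152921504606846976 % 64 from by omega,
      show n / 72057594037927936 % 16 * 4 + n / 281474976710656 % 256 / 64 = n / 18014398509481984 % 64 from by omega,
      show n / 1099511627776 % 256 / 4 = n / 4398046511104 % 64 from by omega,
      show n / 1099511627776 % 4 * 16 + n / 4294967296 % 256 / 16 = n / 68719476736 % 64 from by omega,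
      show n / 4294967296 % 16 * 4 + n / 16777216 % 256 / 64 = n / 1073741824 % 64 from by omega,
      show n / 65536 % 256 / 4 = n / 262144 % 64 from by omega,
      show n / 65536 % 4 * 16 + n / 256 % 256 / 16 = n / 4096 % 64 from by omega,
      show n / 256 % 16 * 4 + n % 256 / 64 = n / 64 % 64 from by omega]
  rfl

-- ===== VERDICT (by name: the statement is the Claim_ definition above) =====
theorem base64_serial_number_py_spec : Claim_equal_base64_serial_number_py := by
  intro s1 s2 s3 _
  unfold Spec_base64_serial_number_py base64_serial_number_py base64_serial_number_py_alt
  exact pv_main (PySem.Int.bor (PySem.Int.bor (s1 <<< 64) (s2 <<< 32)) s3)
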